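-- pv_equiv track=rewrite | github.com/Kin-Engineer/double_ball_analyzer | utils/data_utils.py | calculate_zone_distribution
-- ===== SOURCE A (Python) =====
-- from typing import List, Tuple
--
-- def calculate_zone_distribution(red_balls: List[int]) -> dict:
--     """计算三区分布"""
--     zone1 = sum(1 for x in red_balls if 1 <= x <= 11)
--     zone2 = sum(1 for x in red_balls if 12 <= x <= 22)
--     zone3 = sum(1 for x in red_balls if 23 <= x <= 33)
--
--     return {
--         '一区(01-11)': zone1,
--         '二区(12-22)': zone2,
--         '三区(23-33)': zone3
--     }
-- ===== SOURCE B (Python) =====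
-- def calculate_zone_distribution(red_balls):
--     """计算三区分布"""
--     zone1 = zone2 = zone3 = 0
--     for x in red_balls:
--         if 1 <= x <= 11:
--             zone1 += 1
--         elif 12 <= x <= 22:
--             zone2 += 1
--         elif 23 <= x <= 33:
--             zone3 += 1
--     return {
--         '一区(01-11)': zone1,
--         '二区(12-22)': zone2,
--         '三区(23-33)': zone3
--     }
-- ===== Notes on version B (the rewrite author's own statement) =====
-- stated objective: alternative
-- what changed: Replaces three separate generator-sum scans of the list with a single classifying pass maintaining three counters via if/elif.
import Mathlib
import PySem

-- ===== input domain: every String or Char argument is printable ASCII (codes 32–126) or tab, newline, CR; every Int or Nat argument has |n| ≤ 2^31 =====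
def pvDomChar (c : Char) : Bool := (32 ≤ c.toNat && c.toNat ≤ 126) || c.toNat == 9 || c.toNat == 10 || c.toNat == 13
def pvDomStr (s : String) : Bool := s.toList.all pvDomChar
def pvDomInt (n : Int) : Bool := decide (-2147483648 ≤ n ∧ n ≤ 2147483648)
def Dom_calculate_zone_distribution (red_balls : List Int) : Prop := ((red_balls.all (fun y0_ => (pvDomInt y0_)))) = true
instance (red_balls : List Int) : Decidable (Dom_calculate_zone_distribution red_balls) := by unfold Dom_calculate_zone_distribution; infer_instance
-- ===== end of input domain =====

-- B replaces A's three separate generator-sum scans with one classifying pass over the list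
-- keeping three counters (objective: alternative decomposition, same result).

-- ===== PORT A =====
-- sum(1 for x in red_balls if lo <= x <= hi), one scan per zone
def pvZoneSum (lo hi : Int) (red_balls : List Int) : Int :=
  red_balls.foldl (fun acc x => if lo ≤ x ∧ x ≤ hi then acc + 1 else acc) 0

def calculate_zone_distribution (red_balls : List Int) : List (String × Int) :=
  let zone1 := pvZoneSum 1 11 red_balls
  let zone2 := pvZoneSum 12 22 red_balls
  let zone3 := pvZoneSum 23 33 red_balls
  [("一区(01-11)", zone1), ("二区(12-22)", zone2), ("三区(23-33)", zone3)]

-- ===== PORT B =====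
-- single pass, if/elif classification into three counters
def pvClassify (red_balls : List Int) : Int × Int × Int :=
  red_balls.foldl
    (fun (s : Int × Int × Int) x =>
      if 1 ≤ x ∧ x ≤ 11 then (s.1 + 1, s.2.1, s.2.2)
      else if 12 ≤ x ∧ x ≤ 22 then (s.1, s.2.1 + 1, s.2.2)
      else if 23 ≤ x ∧ x ≤ 33 then (s.1, s.2.1, s.2.2 + 1)
      else s)
    (0, 0, 0)

def calculate_zone_distribution_alt (red_balls : List Int) : List (String × Int) :=
  let s := pvClassify red_balls
  [("一区(01-11)", s.1), ("二区(12-22)", s.2.1), ("三区(23-33)", s.2.2)]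

-- ===== PRECONDITION & SPEC =====
def Spec_calculate_zone_distribution (red_balls : List Int) (out : List (String × Int)) : Prop := out = calculate_zone_distribution_alt red_balls
instance (red_balls : List Int) (out : List (String × Int)) : Decidable (Spec_calculate_zone_distribution red_balls out) := by unfold Spec_calculate_zone_distribution; infer_instance

-- ===== CLAIM (what is proved, stated in full; the proofs are below) =====
def Claim_equal_calculate_zone_distribution : Prop := ∀ (red_balls : List Int), Dom_calculate_zone_distribution red_balls → Spec_calculate_zone_distribution red_balls (calculate_zone_distribution red_balls)

-- ===== LEMMAS AND PROOFS =====
theorem pvClassify_eq (red_balls : List Int) :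
    pvClassify red_balls =
      (pvZoneSum 1 11 red_balls, pvZoneSum 12 22 red_balls, pvZoneSum 23 33 red_balls) := by
  have h : ∀ (l : List Int) (a b c : Int),
      l.foldl
        (fun (s : Int × Int × Int) x =>
          if 1 ≤ x ∧ x ≤ 11 then (s.1 + 1, s.2.1, s.2.2)
          else if 12 ≤ x ∧ x ≤ 22 then (s.1, s.2.1 + 1, s.2.2)
          else if 23 ≤ x ∧ x ≤ 33 then (s.1, s.2.1, s.2.2 + 1)
          else s)
        (a, b, c) =
      (l.foldl (fun acc x => if 1 ≤ x ∧ x ≤ 11 then acc + 1 else acc) a,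
       l.foldl (fun acc x => if 12 ≤ x ∧ x ≤ 22 then acc + 1 else acc) b,
       l.foldl (fun acc x => if 23 ≤ x ∧ x ≤ 33 then acc + 1 else acc) c) := by
    intro l
    induction l with
    | nil => intro a b c; rfl
    | cons x xs ih =>
      intro a b c
      simp only [List.foldl_cons]
      split_ifs with h1 h2 h3 <;>
        simp_all <;> omega
  simpa [pvClassify, pvZoneSum] using h red_balls 0 0 0

-- ===== VERDICT (by name: the statement is the Claim_ definition above) =====
theorem calculate_zone_distribution_spec : Claim_equal_calculate_zone_distribution := by
  intro red_balls _
  unfold Spec_calculate_zone_distribution calculate_zone_distribution calculate_zone_distribution_alt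
  rw [pvClassify_eq]
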